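-- pv_equiv track=rewrite | github.com/zhudingsuifeng/Python | 2018/fly.py | fly
-- ===== SOURCE A (Python) =====
-- def fly(n, s, f):
--     res = 0
--     for i in f:
--         if s >= i:
--             res += 1
--             s -= i
--         else:
--             break
--     return res
-- ===== SOURCE B (Python) =====
-- def fly(n, s, f):
--     # Pass 1: all cumulative sums.
--     sums = []
--     total = 0
--     for x in f:
--         total += x
--         sums.append(total)
--     # Pass 2: running maxima of the cumulative sums (nondecreasing).
--     best = []
--     m = None
--     for v in sums:
--         m = v if m is None or v > m else m
--         best.append(m)
--     # Pass 3: the running max is monotone, so counting every entry <= s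
--     # equals the length of the longest prefix whose sums all fit in s.
--     return sum(1 for v in best if v <= s)
-- ===== Notes on version B (the rewrite author's own statement) =====
-- stated objective: alternative
-- what changed: B replaces A's early-terminating decrement-and-break loop by three staged full passes: it builds all cumulative sums, takes their running maxima (a nondecreasing sequence), and counts every entry <= s with no early exit.
import Mathlib
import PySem

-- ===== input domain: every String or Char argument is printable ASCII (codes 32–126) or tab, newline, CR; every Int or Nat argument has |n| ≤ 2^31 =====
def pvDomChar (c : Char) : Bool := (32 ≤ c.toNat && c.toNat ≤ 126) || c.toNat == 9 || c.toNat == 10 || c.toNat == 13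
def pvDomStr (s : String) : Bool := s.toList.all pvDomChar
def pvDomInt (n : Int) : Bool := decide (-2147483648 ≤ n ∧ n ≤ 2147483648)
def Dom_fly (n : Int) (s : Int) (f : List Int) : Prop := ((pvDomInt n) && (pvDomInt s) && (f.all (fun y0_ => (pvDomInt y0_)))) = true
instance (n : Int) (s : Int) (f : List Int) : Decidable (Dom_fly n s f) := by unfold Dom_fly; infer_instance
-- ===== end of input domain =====

-- B replaces A's decrement-and-break loop by staged full passes (prefix sums, running maxima, count ≤ s); same return value.


-- ===== PORT A =====
-- loop over f with state (s, res); 'break' = return res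
def flyGo (s : Int) (res : Int) : List Int → Int
  | [] => res
  | i :: rest => if s ≥ i then flyGo (s - i) (res + 1) rest else res

def fly (n : Int) (s : Int) (f : List Int) : Int := flyGo s 0 f

-- ===== PORT B =====
-- pass 1: cumulative sums (Python loop appending total)
def flySums (total : Int) : List Int → List Int
  | [] => []
  | x :: rest => (total + x) :: flySums (total + x) rest

-- pass 2: running maxima, m starts as None; 'v if m is None or v > m else m'
def flyNewMax (m : Option Int) (v : Int) : Int :=
  match m with
  | none => v
  | some m0 => if v > m0 then v else m0

def flyRunMax (m : Option Int) : List Int → List Int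
  | [] => []
  | v :: rest => flyNewMax m v :: flyRunMax (some (flyNewMax m v)) rest

def fly_alt (n : Int) (s : Int) (f : List Int) : Int :=
  -- pass 3: count every running-max entry ≤ s
  ((flyRunMax none (flySums 0 f)).countP (fun v => decide (v ≤ s)) : Nat)

-- ===== PRECONDITION & SPEC =====
def Spec_fly (n : Int) (s : Int) (f : List Int) (out : Int) : Prop := out = fly_alt n s f
instance (n : Int) (s : Int) (f : List Int) (out : Int) : Decidable (Spec_fly n s f out) := by unfold Spec_fly; infer_instance

-- ===== CLAIM (what is proved, stated in full; the proofs are below) =====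
def Claim_equal_fly : Prop := ∀ (n : Int) (s : Int) (f : List Int), Dom_fly n s f → Spec_fly n s f (fly n s f)

-- ===== LEMMAS AND PROOFS =====
-- once the running max exceeds s it stays above s, so nothing further is counted
theorem runMax_gt_count (s : Int) : ∀ (l : List Int) (m : Int), s < m →
    (flyRunMax (some m) l).countP (fun v => decide (v ≤ s)) = 0 := by
  intro l
  induction l with
  | nil => intro m _; simp [flyRunMax]
  | cons v rest ih =>
    intro m hm
    simp only [flyRunMax, flyNewMax, List.countP_cons]
    by_cases h : v > m
    · rw [if_pos h]
      have : ¬ v ≤ s := by omega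
      simp [this, ih v (by omega)]
    · rw [if_neg h]
      have : ¬ m ≤ s := by omega
      simp [this, ih m hm]

-- invariant: A's remaining budget is s - t, and the running max so far is ≤ s
theorem flyGo_eq (s : Int) : ∀ (l : List Int) (t res : Int) (m : Option Int),
    (∀ m0, m = some m0 → m0 ≤ s) →
    flyGo (s - t) res l = res + ((flyRunMax m (flySums t l)).countP (fun v => decide (v ≤ s)) : Nat) := by
  intro l
  induction l with
  | nil => intro t res m _; simp [flyGo, flySums, flyRunMax]
  | cons i rest ih =>
    intro t res m hm
    simp only [flyGo, flySums, flyRunMax, List.countP_cons]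
    set v := t + i with hv
    set m' := flyNewMax m v with hm'
    have hle : v ≤ s → m' ≤ s := by
      cases m with
      | none => simp [hm', flyNewMax]
      | some m0 =>
        have := hm m0 rfl
        simp only [hm', flyNewMax]
        by_cases hc : v > m0 <;> simp [hc] <;> omega
    have hgt : s < v → s < m' := by
      cases m with
      | none => simp [hm', flyNewMax]
      | some m0 =>
        have := hm m0 rfl
        simp only [hm', flyNewMax]
        by_cases hc : v > m0 <;> simp [hc] <;> omega
    by_cases h : s - t ≥ i
    · have hvs : v ≤ s := by omega
      have h2 : s - t - i = s - v := by omega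
      rw [if_pos h, h2, ih v (res + 1) (some m') (by intro m0 hmo; cases hmo; exact hle hvs)]
      have : m' ≤ s := hle hvs
      simp [this]
      omega
    · have hvs : s < v := by omega
      have h5 : s < m' := hgt hvs
      rw [if_neg h]
      have hnot : ¬ m' ≤ s := by omega
      simp [hnot, runMax_gt_count s _ _ h5]

-- ===== VERDICT (by name: the statement is the Claim_ definition above) =====
theorem fly_spec : Claim_equal_fly := by
  intro n s f _
  unfold Spec_fly fly fly_alt
  have := flyGo_eq s f 0 0 none (by intro m0 h; cases h)
  simpa using this
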